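-- pv_equiv track=rewrite | github.com/ProKodi/Lesson_repo_3 | Функции/№3/Denis/file 2.py | is_strings_equal
-- ===== SOURCE A (Python) =====
-- def is_strings_equal(str1, str2):
--     """
--     Сравнивает две строки и возвращает
--         True, если они равны, иначе - False.
--     """
--     if len(str1) != len(str2):
--         return False
--
--     str1_dict = {}
--     str2_dict = {}
--
--     for i in str1:
--         if(i not in str1_dict):
--             str1_dict[i] = 0;
--         str1_dict[i] += 1
--
--     for i in str2:
--         if(i not in str2_dict):
--             str2_dict[i] = 0;
--         str2_dict[i] += 1
--
--     return str1_dict == str2_dict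
-- ===== SOURCE B (Python) =====
-- def is_strings_equal(str1, str2):
--     return sorted(str1) == sorted(str2)
-- ===== Notes on version B (the rewrite author's own statement) =====
-- stated objective: idiomatic
-- what changed: Replaced the length guard plus two frequency-dict builds and dict comparison with a single sort-and-compare of the two character lists.
import Mathlib
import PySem

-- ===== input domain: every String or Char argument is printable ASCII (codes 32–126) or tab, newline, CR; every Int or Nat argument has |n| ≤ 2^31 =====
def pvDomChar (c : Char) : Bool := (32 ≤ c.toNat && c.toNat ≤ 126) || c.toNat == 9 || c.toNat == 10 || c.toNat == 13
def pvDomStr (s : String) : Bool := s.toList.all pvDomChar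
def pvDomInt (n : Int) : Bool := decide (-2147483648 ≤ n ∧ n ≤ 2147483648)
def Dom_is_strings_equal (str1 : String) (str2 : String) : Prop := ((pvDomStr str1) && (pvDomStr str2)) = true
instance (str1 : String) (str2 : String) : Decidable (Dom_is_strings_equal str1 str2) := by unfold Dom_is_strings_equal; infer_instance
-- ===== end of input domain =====

-- B replaces A's two frequency-dict builds and dict comparison with an idiomatic sort-and-compare.

-- ===== PORT A =====
-- Python dict == ignores insertion order: same key set and same value at each key.
def pyDictEq (d1 d2 : PySem.Dict Char Int) : Bool :=
  PySem.Set.equal d1.keys d2.keys && d1.keys.all (fun k => d1.get? k == d2.get? k)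

def is_strings_equal (str1 : String) (str2 : String) : Bool :=
  if PySem.Str.len str1 ≠ PySem.Str.len str2 then false
  else
    let str1_dict := str1.toList.foldl
      (fun d i =>
        let d := if !d.contains i then d.insert i 0 else d
        d.insert i (d.getD i 0 + 1)) PySem.Dict.empty
    let str2_dict := str2.toList.foldl
      (fun d i =>
        let d := if !d.contains i then d.insert i 0 else d
        d.insert i (d.getD i 0 + 1)) PySem.Dict.empty
    pyDictEq str1_dict str2_dict

-- ===== PORT B =====
def is_strings_equal_alt (str1 : String) (str2 : String) : Bool :=
  PySem.List.sorted str1.toList (fun x => x) false == PySem.List.sorted str2.toList (fun x => x) false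

-- ===== PRECONDITION & SPEC =====
def Spec_is_strings_equal (str1 : String) (str2 : String) (out : Bool) : Prop := out = is_strings_equal_alt str1 str2
instance (str1 : String) (str2 : String) (out : Bool) : Decidable (Spec_is_strings_equal str1 str2 out) := by unfold Spec_is_strings_equal; infer_instance

-- ===== CLAIM (what is proved, stated in full; the proofs are below) =====
def Claim_equal_is_strings_equal : Prop := ∀ (str1 : String) (str2 : String), Dom_is_strings_equal str1 str2 → Spec_is_strings_equal str1 str2 (is_strings_equal str1 str2)

-- ===== LEMMAS AND PROOFS =====

-- A's guarded loop body equals the plain counting body, so A's dict is Counter(s).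
theorem foldl_A_eq_counter (l : List Char) :
    l.foldl (fun d i =>
        let d := if !d.contains i then d.insert i 0 else d
        d.insert i (d.getD i 0 + 1)) PySem.Dict.empty = PySem.Dict.counter l := by
  rw [← PySem.Dict.foldl_insert_getD_add_one_eq_counter]
  apply PySem.List.foldl_congr_mem
  intro d x _
  by_cases h : d.contains x
  · simp [h]
  · simp only [h, Bool.not_false, if_true]
    rw [PySem.Dict.getD_insert_self, PySem.Dict.insert_insert_self,
        PySem.Dict.getD_of_not_contains]
    simp [h]

theorem get?_counter (l : List Char) (k : Char) :
    (PySem.Dict.counter l).get? k = if k ∈ l then some ((l.count k : Int)) else none := by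
  by_cases h : k ∈ l
  · simp only [h, if_pos]
    have : (k, (l.count k : Int)) ∈ (PySem.Dict.counter l).items := by
      rw [PySem.Dict.items_counter]
      exact List.mem_map.mpr ⟨k, (PySem.Set.mem_ofList _ _).mpr h, rfl⟩
    exact PySem.Dict.get?_of_mem_items _ this (PySem.Dict.nodup_keys_counter l)
  · simp only [h, if_false]
    rw [PySem.Dict.get?_eq_none_iff_not_mem_keys, PySem.Dict.keys_counter]
    simpa [PySem.Set.mem_ofList] using h

theorem A_true_iff_perm (l1 l2 : List Char) :
    (pyDictEq (PySem.Dict.counter l1) (PySem.Dict.counter l2) = true) ↔ l1.Perm l2 := by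
  rw [List.perm_iff_count]
  simp only [pyDictEq, Bool.and_eq_true, PySem.Set.equal_iff, List.all_eq_true,
    PySem.Dict.keys_counter, PySem.Set.mem_ofList, beq_iff_eq]
  constructor
  · rintro ⟨hmem, hval⟩ a
    by_cases h1 : a ∈ l1
    · have := hval a h1
      rw [get?_counter, get?_counter, if_pos h1, if_pos ((hmem a).mp h1)] at this
      exact_mod_cast Option.some.inj this
    · have h2 : a ∉ l2 := fun h => h1 ((hmem a).mpr h)
      simp [List.count_eq_zero_of_not_mem, h1, h2]
  · intro hc
    have hmem : ∀ x, x ∈ l1 ↔ x ∈ l2 := fun x => by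
      constructor <;> intro hx <;>
        [exact List.count_pos_iff.mp (by rw [← hc]; exact List.count_pos_iff.mpr hx);
         exact List.count_pos_iff.mp (by rw [hc]; exact List.count_pos_iff.mpr hx)]
    refine ⟨hmem, fun k hk => ?_⟩
    rw [get?_counter, get?_counter, if_pos hk, if_pos ((hmem k).mp hk), hc]

theorem is_strings_equal_eq_alt (str1 str2 : String) :
    is_strings_equal str1 str2 = is_strings_equal_alt str1 str2 := by
  rw [Bool.eq_iff_iff]
  have halt : is_strings_equal_alt str1 str2 = true ↔ str1.toList.Perm str2.toList := by
    simp only [is_strings_equal_alt, beq_iff_eq]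
    exact PySem.List.sorted_id_eq_sorted_id_iff_perm _ _
  rw [halt]
  unfold is_strings_equal
  split
  · rename_i hlen
    constructor
    · intro h; exact (Bool.false_ne_true h).elim
    · intro hp
      exact absurd (by simpa [PySem.Str.len_eq] using hp.length_eq) hlen
  · simp only [foldl_A_eq_counter]
    exact A_true_iff_perm _ _

-- ===== VERDICT (by name: the statement is the Claim_ definition above) =====
theorem is_strings_equal_spec : Claim_equal_is_strings_equal := by
  intro str1 str2 _
  exact is_strings_equal_eq_alt str1 str2
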